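-- pv_equiv track=rewrite | github.com/bazarbekovic131/todoapp | backtrace_teams.py | backtrack
-- ===== SOURCE A (Python) =====
-- def is_valid(assignment, current_group_id, activity1, activity2):
--     for group_id, activities in assignment.items():
--         if group_id != current_group_id:
--             if activity1 in activities or activity2 in activities:
--                 return False
--     return True
--
-- def backtrack(group_id, assignment, activities, num_groups):
--     if group_id > num_groups:
--         return True, assignment
--     for activity1 in activities:
--         for activity2 in activities:
--             if activity1 != activity2 and is_valid(assignment, group_id, activity1, activity2):
--                 assignment[group_id] = [activity1, activity2]
--                 if backtrack(group_id + 1, assignment, activities, num_groups)[0]: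
--                     return True, assignment
--                 assignment[group_id] = []
--     return False, {}
-- ===== SOURCE B (Python) =====
-- def backtrack(group_id, assignment, activities, num_groups):
--     # Greedy single forward pass: the search never needs to backtrack, so for
--     # each group take the first two distinct unblocked activity values.
--     # (Return-value equivalence only: A mutates its `assignment` argument.)
--     asg = dict(assignment)
--     for g in range(group_id, num_groups + 1):
--         blocked = {v for k, vs in asg.items() if k != g for v in vs}
--         a1 = next((x for x in activities if x not in blocked), None)
--         if a1 is None:
--             return False, {}
--         a2 = next((x for x in activities if x not in blocked and x != a1), None)
--         if a2 is None:
--             return False, {}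
--         asg[g] = [a1, a2]
--     return True, asg
-- ===== Notes on version B (the rewrite author's own statement) =====
-- stated objective: alternative
-- what changed: Replaces the recursive backtracking search (nested candidate-pair loops with per-pair validity scans, recursion and undo of the shared dict) by a single non-recursive forward greedy pass that builds a blocked-value set per group and picks the first two distinct free activities; this is the same result because the backtracking never needs to revise a choice.
import Mathlib
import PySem

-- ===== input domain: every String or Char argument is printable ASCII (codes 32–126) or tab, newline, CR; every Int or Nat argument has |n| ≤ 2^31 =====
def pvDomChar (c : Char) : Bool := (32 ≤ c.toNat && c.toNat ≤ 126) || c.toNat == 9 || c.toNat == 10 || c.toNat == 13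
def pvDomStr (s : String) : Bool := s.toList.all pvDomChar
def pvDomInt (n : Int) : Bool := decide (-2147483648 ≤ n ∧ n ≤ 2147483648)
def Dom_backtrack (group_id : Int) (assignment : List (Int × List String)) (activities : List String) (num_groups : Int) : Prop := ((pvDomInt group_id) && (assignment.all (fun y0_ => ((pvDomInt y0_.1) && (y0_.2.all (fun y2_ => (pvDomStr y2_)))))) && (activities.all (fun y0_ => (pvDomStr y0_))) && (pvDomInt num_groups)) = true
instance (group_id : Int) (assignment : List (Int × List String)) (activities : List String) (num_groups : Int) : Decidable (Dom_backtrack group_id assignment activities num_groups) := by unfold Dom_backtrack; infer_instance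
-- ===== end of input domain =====

-- B replaces A's recursive backtracking search by a single greedy forward pass (the search never
-- needs to backtrack); equivalence is about the RETURN value only — Python A also mutates its
-- `assignment` argument in place, which B does not.

-- ===== PORT A =====
-- Python dict assignment `d[k] = v` on an association list with distinct keys
-- (overwrite keeps position, new keys append); used by both ports as the dict primitive.
def dinsert (d : List (Int × List String)) (k : Int) (v : List String) : List (Int × List String) :=
  match d with
  | [] => [(k, v)]
  | kv :: rest => if kv.1 = k then (k, v) :: rest else kv :: dinsert rest k v

def isValidA (asg : List (Int × List String)) (cur : Int) (a1 a2 : String) : Bool :=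
  asg.all fun kv => if kv.1 = cur then true else !(kv.2.contains a1 || kv.2.contains a2)

-- A's recursion, fuel-structured (fuel = number of groups still to fill + 1, always sufficient);
-- each function returns (result-so-far, mutated dict state) to model Python's in-place mutation.
mutual
def btA (fuel : Nat) (gid : Int) (asg : List (Int × List String)) (acts : List String) (ng : Int) : (Bool × List (Int × List String)) × List (Int × List String) :=
  if gid > ng then ((true, asg), asg)
  else
    match fuel with
    | 0 => ((false, []), asg)   -- unreachable: fuel = (ng + 1 - gid).toNat ≥ 1 when gid ≤ ng
    | Nat.succ f =>
      match btOuter f gid asg acts ng acts with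
      | (some res, st) => (res, st)
      | (none, st) => ((false, []), st)
  termination_by (fuel, 0, 0)

def btOuter (f : Nat) (gid : Int) (asg : List (Int × List String)) (acts : List String) (ng : Int) : List String → Option (Bool × List (Int × List String)) × List (Int × List String)
  | [] => (none, asg)
  | a1 :: rest =>
    match btInner f gid acts ng a1 asg acts with
    | (some res, st) => (some res, st)
    | (none, st) => btOuter f gid st acts ng rest
  termination_by l => (f, 2, l.length)

def btInner (f : Nat) (gid : Int) (acts : List String) (ng : Int) (a1 : String) (asg : List (Int × List String)) : List String → Option (Bool × List (Int × List String)) × List (Int × List String)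
  | [] => (none, asg)
  | a2 :: rest =>
    if (a1 != a2) && isValidA asg gid a1 a2 then
      let r := btA f (gid + 1) (dinsert asg gid [a1, a2]) acts ng
      if r.1.1 then (some (true, r.2), r.2)
      else btInner f gid acts ng a1 (dinsert r.2 gid []) rest
    else btInner f gid acts ng a1 asg rest
  termination_by l => (f, 1, l.length)
end

def backtrack (group_id : Int) (assignment : List (Int × List String)) (activities : List String) (num_groups : Int) : Bool × (List (Int × List String)) :=
  (btA ((num_groups + 1 - group_id).toNat) group_id assignment activities num_groups).1

-- ===== PORT B =====
-- blocked = {v for k, vs in asg.items() if k != g for v in vs}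
def blockedB (asg : List (Int × List String)) (g : Int) : PySem.Set String :=
  PySem.Set.ofList ((asg.filter fun kv => kv.1 != g).flatMap fun kv => kv.2)

def goB : Nat → Int → List (Int × List String) → List String → Bool × List (Int × List String)
  | 0, _, asg, _ => (true, asg)
  | Nat.succ n, g, asg, acts =>
    let blocked := blockedB asg g
    match acts.find? (fun x => !(PySem.Set.contains blocked x)) with
    | none => (false, [])
    | some a1 =>
      match acts.find? (fun x => !(PySem.Set.contains blocked x) && x != a1) with
      | none => (false, [])
      | some a2 => goB n (g + 1) (dinsert asg g [a1, a2]) acts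

def backtrack_alt (group_id : Int) (assignment : List (Int × List String)) (activities : List String) (num_groups : Int) : Bool × (List (Int × List String)) :=
  goB ((num_groups + 1 - group_id).toNat) group_id assignment activities

-- ===== PRECONDITION & SPEC =====
-- Pre_ excludes association lists with duplicate keys, which cannot arise from a Python dict
-- argument (the proofs rely on each group id occurring at most once).
def Pre_backtrack (group_id : Int) (assignment : List (Int × List String)) (activities : List String) (num_groups : Int) : Prop :=
  (assignment.map Prod.fst).Nodup
instance (group_id : Int) (assignment : List (Int × List String)) (activities : List String) (num_groups : Int) : Decidable (Pre_backtrack group_id assignment activities num_groups) := by unfold Pre_backtrack; infer_instance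

def pvWitness_backtrack : Int × (List (Int × List String)) × List String × Int :=
  (1, [(3, ["c"])], ["a", "b", "c", "d"], 2)

def Spec_backtrack (group_id : Int) (assignment : List (Int × List String)) (activities : List String) (num_groups : Int) (out : Bool × (List (Int × List String))) : Prop := out = backtrack_alt group_id assignment activities num_groups
instance (group_id : Int) (assignment : List (Int × List String)) (activities : List String) (num_groups : Int) (out : Bool × (List (Int × List String))) : Decidable (Spec_backtrack group_id assignment activities num_groups out) := by unfold Spec_backtrack; infer_instance

-- ===== CLAIM (what is proved, stated in full; the proofs are below) =====
def Claim_equal_backtrack : Prop := ∀ (group_id : Int) (assignment : List (Int × List String)) (activities : List String) (num_groups : Int), Dom_backtrack group_id assignment activities num_groups → Pre_backtrack group_id assignment activities num_groups → Spec_backtrack group_id assignment activities num_groups (backtrack group_id assignment activities num_groups)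

-- ===== LEMMAS AND PROOFS =====

-- window-blocking predicate: entries whose key is strictly below g or strictly above h
def outP (g h : Int) (kv : Int × List String) : Bool := decide (kv.1 < g) || decide (h < kv.1)

-- values blocked for the window [g, h]
def wblk (d : List (Int × List String)) (g h : Int) : List String :=
  (d.filter (outP g h)).flatMap fun kv => kv.2

def KN (d : List (Int × List String)) : Prop := (d.map Prod.fst).Nodup

-- distinct activity values not blocked for the window [g, h]
def freeF (acts : List String) (d : List (Int × List String)) (g h : Int) : Finset String :=
  (acts.filter fun v => decide (v ∉ wblk d g h)).toFinset

-- "two dict states agree outside the window [g, h]"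
def Out (g h : Int) (d e : List (Int × List String)) : Prop :=
  d.filter (outP g h) = e.filter (outP g h)

lemma mem_wblk {d : List (Int × List String)} {g h : Int} {x : String} :
    x ∈ wblk d g h ↔ ∃ kv ∈ d, (kv.1 < g ∨ h < kv.1) ∧ x ∈ kv.2 := by
  simp only [wblk, List.mem_flatMap, List.mem_filter, outP, Bool.or_eq_true, decide_eq_true_eq]
  constructor
  · rintro ⟨kv, ⟨hkv, hr⟩, hx⟩; exact ⟨kv, hkv, hr, hx⟩
  · rintro ⟨kv, hkv, hr, hx⟩; exact ⟨kv, ⟨hkv, hr⟩, hx⟩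

lemma mem_freeF {acts : List String} {d : List (Int × List String)} {g h : Int} {x : String} :
    x ∈ freeF acts d g h ↔ x ∈ acts ∧ x ∉ wblk d g h := by
  simp [freeF]

lemma isValidA_true_iff {d : List (Int × List String)} {g : Int} {a1 a2 : String} :
    isValidA d g a1 a2 = true ↔ a1 ∉ wblk d g g ∧ a2 ∉ wblk d g g := by
  simp only [isValidA, List.all_eq_true, mem_wblk]
  constructor
  · intro hv
    constructor
    · rintro ⟨kv, hkv, hk, hx⟩
      have := hv kv hkv
      have hne : ¬ kv.1 = g := by omega
      simp [hne] at this
      exact this.1 hx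
    · rintro ⟨kv, hkv, hk, hx⟩
      have := hv kv hkv
      have hne : ¬ kv.1 = g := by omega
      simp [hne] at this
      exact this.2 hx
  · rintro ⟨h1, h2⟩ kv hkv
    by_cases hk : kv.1 = g
    · simp [hk]
    · simp [hk]
      constructor
      · intro hx; exact h1 ⟨kv, hkv, by omega, hx⟩
      · intro hx; exact h2 ⟨kv, hkv, by omega, hx⟩

lemma contains_blockedB {d : List (Int × List String)} {g : Int} {x : String} :
    PySem.Set.contains (blockedB d g) x = true ↔ x ∈ wblk d g g := by
  rw [PySem.Set.contains_iff, blockedB, PySem.Set.mem_ofList]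
  simp only [List.mem_flatMap, List.mem_filter, mem_wblk, bne_iff_ne]
  constructor
  · rintro ⟨kv, ⟨hkv, hne⟩, hx⟩; exact ⟨kv, hkv, by omega, hx⟩
  · rintro ⟨kv, hkv, hne, hx⟩; exact ⟨kv, ⟨hkv, by omega⟩, hx⟩

lemma KN_dinsert {d : List (Int × List String)} {k : Int} {v : List String} (h : KN d) :
    KN (dinsert d k v) := by
  induction d with
  | nil => simp [dinsert, KN]
  | cons kv rest ih =>
    simp only [KN, List.map_cons, List.nodup_cons] at h
    by_cases hk : kv.1 = k
    · subst hk
      simpa [dinsert, KN] using h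
    · have := ih h.2
      simp only [dinsert, if_neg hk]
      simp only [KN, List.map_cons, List.nodup_cons]
      refine ⟨?_, this⟩
      intro hmem
      -- keys of dinsert rest k v ⊆ keys rest ∪ {k}
      have hsub : ∀ (r : List (Int × List String)), kv.1 ∈ (dinsert r k v).map Prod.fst →
          kv.1 ∈ r.map Prod.fst ∨ kv.1 = k := by
        intro r
        induction r with
        | nil => simp [dinsert]
        | cons kv' rest' ih' =>
          by_cases hk' : kv'.1 = k
          · simp [dinsert, hk']
            tauto
          · simp only [dinsert, if_neg hk', List.map_cons, List.mem_cons]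
            intro hc
            rcases hc with hc | hc
            · exact Or.inl (Or.inl hc)
            · rcases ih' hc with h' | h'
              · exact Or.inl (Or.inr h')
              · exact Or.inr h'
      rcases hsub rest hmem with h' | h'
      · exact h.1 h'
      · exact hk h'

lemma filter_dinsert {p : Int × List String → Bool} {d : List (Int × List String)} {k : Int}
    {v : List String} (hp : ∀ w, p (k, w) = false) :
    (dinsert d k v).filter p = d.filter p := by
  induction d with
  | nil => simp [dinsert, List.filter, hp v]
  | cons kv rest ih =>
    by_cases hk : kv.1 = k
    · have hkv : p kv = false := by
        have hkk : kv = (k, kv.2) := by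
          ext
          · exact hk
          · rfl
        rw [hkk]; exact hp kv.2
      simp [dinsert, hk, hp v, hkv]
    · simp only [dinsert, if_neg hk, List.filter_cons, ih]

lemma Out_dinsert {d : List (Int × List String)} {g h k : Int} {v : List String}
    (h1 : g ≤ k) (h2 : k ≤ h) : Out g h d (dinsert d k v) := by
  unfold Out
  rw [filter_dinsert]
  intro w
  simp [outP]
  omega

lemma Out_mono {d e : List (Int × List String)} {g h : Int} (ho : Out (g + 1) h d e) :
    Out g h d e := by
  unfold Out at *
  have key : ∀ (l : List (Int × List String)),
      l.filter (outP g h) = (l.filter (outP (g+1) h)).filter (outP g h) := by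
    intro l
    rw [List.filter_filter]
    apply List.filter_congr
    intro kv _
    by_cases hc : outP g h kv = true
    · have : outP (g+1) h kv = true := by
        simp [outP] at hc ⊢; omega
      simp [hc, this]
    · simp [Bool.eq_false_iff.mpr hc]
  rw [key d, key e, ho]

lemma wblk_Out {d e : List (Int × List String)} {g h : Int} (ho : Out g h d e) :
    wblk d g h = wblk e g h := by
  unfold wblk; rw [ho]

lemma freeF_Out {acts : List String} {d e : List (Int × List String)} {g h : Int}
    (ho : Out g h d e) : freeF acts d g h = freeF acts e g h := by
  unfold freeF; rw [wblk_Out ho]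

lemma wblk_anti {d : List (Int × List String)} {g h : Int} {x : String} (hgh : g ≤ h)
    (hx : x ∈ wblk d g h) : x ∈ wblk d g g := by
  rw [mem_wblk] at *
  obtain ⟨kv, hkv, hr, hm⟩ := hx
  exact ⟨kv, hkv, by omega, hm⟩

lemma wblk_cons {kv : Int × List String} {d : List (Int × List String)} {g h : Int} :
    wblk (kv :: d) g h = (if kv.1 < g ∨ h < kv.1 then kv.2 else []) ++ wblk d g h := by
  by_cases hc : kv.1 < g ∨ h < kv.1
  · simp [wblk, outP, hc]
  · have h1 : ¬ kv.1 < g := fun hh => hc (Or.inl hh)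
    have h2 : ¬ h < kv.1 := fun hh => hc (Or.inr hh)
    simp [wblk, outP, h1, h2]

lemma mem_wblk_dinsert_pair {d : List (Int × List String)} {g h : Int} {vs : List String}
    (hkn : KN d) (hgh : g ≤ h) {x : String} :
    x ∈ wblk (dinsert d g vs) (g + 1) h ↔ x ∈ vs ∨ x ∈ wblk d g h := by
  induction d with
  | nil =>
    rw [show dinsert [] g vs = [(g, vs)] from rfl, wblk_cons]
    simp [wblk, show g < g + 1 by omega, show ¬ h < g by omega]
  | cons kv rest ih =>
    have hkn' : KN rest := by
      simp only [KN, List.map_cons, List.nodup_cons] at hkn; exact hkn.2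
    by_cases hk : kv.1 = g
    · have hnog : ∀ kv' ∈ rest, kv'.1 ≠ g := by
        simp only [KN, List.map_cons, List.nodup_cons] at hkn
        intro kv' h' he
        exact hkn.1 (by rw [hk] at *; exact he ▸ List.mem_map_of_mem h')
      have hshift : wblk rest (g + 1) h = wblk rest g h := by
        unfold wblk
        congr 1
        apply List.filter_congr
        intro kv' hm'
        have := hnog kv' hm'
        simp only [outP]
        congr 1
        simp only [decide_eq_decide]
        omega
      rw [show dinsert (kv :: rest) g vs = (g, vs) :: rest by simp [dinsert, hk], wblk_cons,
        wblk_cons, hshift]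
      have hc1 : ((g, vs) : Int × List String).1 < g + 1 ∨ h < ((g, vs) : Int × List String).1 :=
        Or.inl (by norm_num)
      have hc2 : ¬ (kv.1 < g ∨ h < kv.1) := by omega
      rw [if_pos hc1, if_neg hc2]
      simp [List.mem_append]
    · rw [show dinsert (kv :: rest) g vs = kv :: dinsert rest g vs by simp [dinsert, hk],
        wblk_cons, wblk_cons]
      have hpred : (kv.1 < g + 1 ∨ h < kv.1) ↔ (kv.1 < g ∨ h < kv.1) := by omega
      by_cases hc : kv.1 < g ∨ h < kv.1
      · simp only [if_pos (hpred.mpr hc), if_pos hc, List.mem_append, ih hkn']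
        tauto
      · simp only [if_neg (fun hh => hc (hpred.mp hh)), if_neg hc, List.nil_append, ih hkn']

lemma card_dinsert_pair {acts : List String} {d : List (Int × List String)} {g h : Int}
    {p1 p2 : String} (hkn : KN d) (hgh : g ≤ h) (hne : p1 ≠ p2)
    (h1a : p1 ∈ acts) (h2a : p2 ∈ acts)
    (h1f : p1 ∉ wblk d g h) (h2f : p2 ∉ wblk d g h) :
    (freeF acts d g h).card = (freeF acts (dinsert d g [p1, p2]) (g + 1) h).card + 2 := by
  have hset : freeF acts (dinsert d g [p1, p2]) (g + 1) h = freeF acts d g h \ {p1, p2} := by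
    ext v
    rw [mem_freeF, Finset.mem_sdiff, mem_freeF, mem_wblk_dinsert_pair hkn hgh]
    simp only [List.mem_cons, List.not_mem_nil, Finset.mem_insert, Finset.mem_singleton]
    tauto
  have hsub : ({p1, p2} : Finset String) ⊆ freeF acts d g h := by
    intro v hv
    simp only [Finset.mem_insert, Finset.mem_singleton] at hv
    rcases hv with hv | hv <;> subst hv <;> rw [mem_freeF] <;> exact ⟨by assumption, by assumption⟩
  have hcard2 : ({p1, p2} : Finset String).card = 2 := Finset.card_pair hne
  have hint : ({p1, p2} : Finset String) ∩ freeF acts d g h = {p1, p2} :=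
    Finset.inter_eq_left.mpr hsub
  have hle := Finset.card_le_card hsub
  have hsd : (freeF acts d g h \ {p1, p2}).card
      = (freeF acts d g h).card - ({p1, p2} ∩ freeF acts d g h).card := Finset.card_sdiff ..
  rw [hset, hsd, hint, hcard2]
  omega

lemma find?_split {α : Type} {p : α → Bool} {l : List α} {a : α} (h : l.find? p = some a) :
    ∃ s t, l = s ++ a :: t ∧ (∀ x ∈ s, p x = false) ∧ p a = true := by
  induction l with
  | nil => simp at h
  | cons b l' ih =>
    by_cases hb : p b = true
    · rw [List.find?_cons_of_pos hb] at h
      obtain rfl := Option.some_inj.mp h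
      exact ⟨[], l', by simp, by simp, hb⟩
    · rw [List.find?_cons_of_neg hb] at h
      obtain ⟨s, t, he, hs, ha⟩ := ih h
      exact ⟨b :: s, t, by simp [he], by simpa [hb] using hs, ha⟩

lemma goB_false {n : Nat} {g : Int} {d : List (Int × List String)} {acts : List String}
    (h : (goB n g d acts).1 = false) : goB n g d acts = (false, []) := by
  induction n generalizing g d with
  | zero => simp [goB] at h
  | succ n ih =>
    rw [goB] at h ⊢
    rcases hf1 : acts.find? (fun x => !(PySem.Set.contains (blockedB d g) x)) with _ | a1
    · rfl
    · rcases hf2 : acts.find? (fun x => !(PySem.Set.contains (blockedB d g) x) && x != a1) with _ | a2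
      · simp only [hf2]
      · simp only [hf1, hf2] at h
        simp only [hf2]
        exact ih h

lemma goB_false_witness {acts : List String} :
    ∀ {n : Nat} {g : Int} {d : List (Int × List String)}, KN d →
    (goB n g d acts).1 = false →
    ∃ i : Nat, i < n ∧ (freeF acts d g (g + (i : Int))).card < 2 * (i + 1) := by
  intro n
  induction n with
  | zero => intro g d _ h; simp [goB] at h
  | succ n ih =>
    intro g d hkn h
    rw [goB] at h
    rcases hf1 : acts.find? (fun x => !(PySem.Set.contains (blockedB d g) x)) with _ | a1
    · refine ⟨0, by omega, ?_⟩
      have hempty : freeF acts d g (g + (0 : Int)) = ∅ := by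
        ext v
        rw [mem_freeF]
        simp only [Finset.notMem_empty, iff_false]
        rintro ⟨hva, hvn⟩
        have := List.find?_eq_none.mp hf1 v hva
        simp only [Bool.not_eq_true', Bool.not_eq_false] at this
        exact hvn (by simpa using contains_blockedB.mp this)
      rw [show g + ((0 : Nat) : Int) = g + (0 : Int) by norm_num, hempty]
      simp
    · rcases hf2 : acts.find? (fun x => !(PySem.Set.contains (blockedB d g) x) && x != a1) with _ | a2
      · refine ⟨0, by omega, ?_⟩
        have hsub : freeF acts d g (g + ((0 : Nat) : Int)) ⊆ {a1} := by
          intro v hv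
          rw [show g + ((0 : Nat) : Int) = g by norm_num] at hv
          rw [mem_freeF] at hv
          have hn := List.find?_eq_none.mp hf2 v hv.1
          have hc : PySem.Set.contains (blockedB d g) v = false := by
            cases hcb : PySem.Set.contains (blockedB d g) v
            · rfl
            · exact absurd (contains_blockedB.mp hcb) hv.2
          rw [hc] at hn
          simp only [Bool.not_false, Bool.true_and] at hn
          have hva : v = a1 := by simpa [bne_iff_ne] using hn
          simp [hva]
        have := Finset.card_le_card hsub
        simp only [Finset.card_singleton] at this
        rw [show g + ((0 : Nat) : Int) = g + (0 : Int) by norm_num] at *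
        omega
      · simp only [hf1, hf2] at h
        -- properties of a1 a2
        obtain ⟨s1, t1, he1, hs1, ha1⟩ := find?_split hf1
        obtain ⟨s2, t2, he2, hs2, ha2⟩ := find?_split hf2
        have ha1m : a1 ∈ acts := by rw [he1]; simp
        have ha2m : a2 ∈ acts := by rw [he2]; simp
        have ha1f : a1 ∉ wblk d g g := by
          intro hcw
          have hcb := contains_blockedB.mpr hcw
          rw [hcb] at ha1
          simp at ha1
        obtain ⟨hx2, hy2⟩ := Bool.and_eq_true_iff.mp ha2
        have ha2f : a2 ∉ wblk d g g := by
          intro hcw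
          have hcb := contains_blockedB.mpr hcw
          rw [hcb] at hx2
          simp at hx2
        have hne : a1 ≠ a2 := Ne.symm (bne_iff_ne.mp hy2)
        obtain ⟨i, hi, hcard⟩ := ih (KN_dinsert hkn) h
        refine ⟨i + 1, by omega, ?_⟩
        have hgh : g ≤ g + ((i : Int) + 1) := by omega
        have h1f : a1 ∉ wblk d g (g + ((i : Int) + 1)) := fun hc => ha1f (wblk_anti hgh hc)
        have h2f : a2 ∉ wblk d g (g + ((i : Int) + 1)) := fun hc => ha2f (wblk_anti hgh hc)
        have := card_dinsert_pair (acts := acts) hkn hgh hne ha1m ha2m h1f h2f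
        have harg : g + 1 + (i : Int) = g + ((i : Int) + 1) := by ring
        rw [harg] at hcard
        rw [show g + (((i + 1 : Nat)) : Int) = g + ((i : Int) + 1) by push_cast; ring]
        omega

lemma innerRes {f : Nat} {g ng : Int} {acts : List String} :
    ∀ (l : List String) (a1 : String) (d : List (Int × List String))
      {res : Bool × List (Int × List String)} {st : List (Int × List String)},
    btInner f g acts ng a1 d l = (some res, st) → res = (true, st) := by
  intro l
  induction l with
  | nil => intro a1 d res st h; simp [btInner] at h
  | cons a2 rest ih =>
    intro a1 d res st h
    simp only [btInner] at h
    by_cases hc : ((a1 != a2) && isValidA d g a1 a2) = true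
    · rw [if_pos hc] at h
      by_cases hr : (btA f (g + 1) (dinsert d g [a1, a2]) acts ng).1.1 = true
      · rw [if_pos hr] at h
        simp only [Prod.mk.injEq, Option.some.injEq] at h
        rw [← h.2]
        exact h.1.symm
      · rw [if_neg hr] at h
        exact ih a1 _ h
    · rw [if_neg hc] at h
      exact ih a1 d h

lemma outerRes {f : Nat} {g ng : Int} {acts : List String} :
    ∀ (l : List String) (d : List (Int × List String))
      {res : Bool × List (Int × List String)} {st : List (Int × List String)},
    btOuter f g d acts ng l = (some res, st) → res = (true, st) := by
  intro l
  induction l with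
  | nil => intro d res st h; simp [btOuter] at h
  | cons a1 rest ih =>
    intro d res st h
    simp only [btOuter] at h
    rcases hbi : btInner f g acts ng a1 d acts with ⟨ropt, st'⟩
    rw [hbi] at h
    rcases ropt with _ | res'
    · exact ih st' h
    · simp only [Prod.mk.injEq, Option.some.injEq] at h
      obtain ⟨h1, h2⟩ := h
      subst h1; subst h2
      exact innerRes acts a1 d hbi

lemma btARes {fuel : Nat} {gid ng : Int} {asg : List (Int × List String)} {acts : List String}
    (h : (btA fuel gid asg acts ng).1.1 = true) :
    (btA fuel gid asg acts ng).1 = (true, (btA fuel gid asg acts ng).2) := by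
  by_cases hgt : gid > ng
  · simp [btA.eq_def, hgt]
  · rcases fuel with _ | f
    · simp [btA.eq_def, hgt] at h
    · simp only [btA.eq_def, if_neg hgt] at h ⊢
      rcases hbo : btOuter f gid asg acts ng acts with ⟨ropt, st⟩
      rcases ropt with _ | res
      · rw [hbo] at h
        simp at h
      · simpa using outerRes acts asg hbo

lemma innerSkip {f : Nat} {g ng : Int} {acts : List String} :
    ∀ (l : List String) (a1 : String) (d : List (Int × List String)),
    (∀ a2 ∈ l, ((a1 != a2) && isValidA d g a1 a2) = false) →
    btInner f g acts ng a1 d l = (none, d) := by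
  intro l
  induction l with
  | nil => intro a1 d _; simp [btInner]
  | cons a2 rest ih =>
    intro a1 d hall
    simp only [btInner]
    rw [if_neg (by simp [hall a2 (List.mem_cons_self ..)])]
    exact ih a1 d (fun x hx => hall x (List.mem_cons_of_mem _ hx))

lemma innerSkipPrefix {f : Nat} {g ng : Int} {acts : List String} :
    ∀ (s : List String) (l : List String) (a1 : String) (d : List (Int × List String)),
    (∀ a2 ∈ s, ((a1 != a2) && isValidA d g a1 a2) = false) →
    btInner f g acts ng a1 d (s ++ l) = btInner f g acts ng a1 d l := by
  intro s
  induction s with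
  | nil => intro l a1 d _; simp
  | cons a2 rest ih =>
    intro l a1 d hall
    rw [List.cons_append]
    simp only [btInner]
    rw [if_neg (by simp [hall a2 (List.mem_cons_self ..)])]
    exact ih l a1 d (fun x hx => hall x (List.mem_cons_of_mem _ hx))

lemma outerSkip {f : Nat} {g ng : Int} {acts : List String} :
    ∀ (l : List String) (d : List (Int × List String)),
    (∀ a1 ∈ l, ∀ a2 ∈ acts, ((a1 != a2) && isValidA d g a1 a2) = false) →
    btOuter f g d acts ng l = (none, d) := by
  intro l
  induction l with
  | nil => intro d _; simp [btOuter]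
  | cons a1 rest ih =>
    intro d hall
    simp only [btOuter]
    rw [innerSkip acts a1 d (hall a1 (List.mem_cons_self ..))]
    exact ih d (fun x hx => hall x (List.mem_cons_of_mem _ hx))

lemma outerSkipPrefix {f : Nat} {g ng : Int} {acts : List String} :
    ∀ (s : List String) (l : List String) (d : List (Int × List String)),
    (∀ a1 ∈ s, ∀ a2 ∈ acts, ((a1 != a2) && isValidA d g a1 a2) = false) →
    btOuter f g d acts ng (s ++ l) = btOuter f g d acts ng l := by
  intro s
  induction s with
  | nil => intro l d _; simp
  | cons a1 rest ih =>
    intro l d hall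
    rw [List.cons_append]
    simp only [btOuter]
    rw [innerSkip acts a1 d (hall a1 (List.mem_cons_self ..))]
    exact ih l d (fun x hx => hall x (List.mem_cons_of_mem _ hx))

lemma innerFail {f : Nat} {g H ng : Int} {acts : List String}
    (hgH : g ≤ H) (hHng : H ≤ ng)
    (hrec : ∀ d', KN d' → g + 1 ≤ H →
      (freeF acts d' (g + 1) H).card < 2 * ((H - (g + 1)).toNat + 1) →
      ∃ e, btA f (g + 1) d' acts ng = ((false, []), e) ∧ KN e ∧ Out (g + 1) H d' e) :
    ∀ (l : List String) (a1 : String) (d : List (Int × List String)),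
    a1 ∈ acts → (∀ x ∈ l, x ∈ acts) → KN d →
    (freeF acts d g H).card < 2 * ((H - g).toNat + 1) →
    ∃ e, btInner f g acts ng a1 d l = (none, e) ∧ KN e ∧ Out g H d e := by
  intro l
  induction l with
  | nil =>
    intro a1 d _ _ hkn _
    exact ⟨d, by simp [btInner], hkn, rfl⟩
  | cons a2 rest ih =>
    intro a1 d ha1 hsub hkn hcard
    by_cases hc : ((a1 != a2) && isValidA d g a1 a2) = true
    · obtain ⟨hcne, hcval⟩ := Bool.and_eq_true_iff.mp hc
      have hne : a1 ≠ a2 := bne_iff_ne.mp hcne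
      obtain ⟨h1g, h2g⟩ := isValidA_true_iff.mp hcval
      have ha2 : a2 ∈ acts := hsub a2 (List.mem_cons_self ..)
      have h1H : a1 ∉ wblk d g H := fun hx => h1g (wblk_anti hgH hx)
      have h2H : a2 ∉ wblk d g H := fun hx => h2g (wblk_anti hgH hx)
      have hsubF : ({a1, a2} : Finset String) ⊆ freeF acts d g H := by
        intro v hv
        simp only [Finset.mem_insert, Finset.mem_singleton] at hv
        rcases hv with rfl | rfl <;> exact mem_freeF.mpr ⟨by assumption, by assumption⟩
      have hge2 : 2 ≤ (freeF acts d g H).card := by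
        have := Finset.card_le_card hsubF
        rw [Finset.card_pair hne] at this
        exact this
      have hgltH : g < H := by
        rcases lt_or_eq_of_le hgH with h' | h'
        · exact h'
        · exfalso; subst h'; rw [show (g - g).toNat = 0 by omega] at hcard; omega
      have hcard1 := card_dinsert_pair (acts := acts) hkn hgH hne ha1 ha2 h1H h2H
      have hcardst : (freeF acts (dinsert d g [a1, a2]) (g + 1) H).card
          < 2 * ((H - (g + 1)).toNat + 1) := by omega
      obtain ⟨e, hbt, hkne, houte⟩ :=
        hrec (dinsert d g [a1, a2]) (KN_dinsert hkn) (by omega) hcardst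
      have hstep : btInner f g acts ng a1 d (a2 :: rest)
          = btInner f g acts ng a1 (dinsert e g []) rest := by
        simp only [btInner]
        rw [if_pos hc, hbt]
        simp
      have hout1 : Out g H d (dinsert d g [a1, a2]) := Out_dinsert (le_refl g) hgH
      have hout2 : Out g H (dinsert d g [a1, a2]) e := Out_mono houte
      have hout3 : Out g H e (dinsert e g []) := Out_dinsert (le_refl g) hgH
      have houtd2 : Out g H d (dinsert e g []) := (hout1.trans hout2).trans hout3
      have hcard2 : (freeF acts (dinsert e g []) g H).card < 2 * ((H - g).toNat + 1) := by
        rw [← freeF_Out houtd2]; exact hcard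
      obtain ⟨e2, hrun, hkne2, houte2⟩ := ih a1 (dinsert e g []) ha1
        (fun x hx => hsub x (List.mem_cons_of_mem _ hx)) (KN_dinsert hkne) hcard2
      exact ⟨e2, hstep.trans hrun, hkne2, houtd2.trans houte2⟩
    · have hstep : btInner f g acts ng a1 d (a2 :: rest) = btInner f g acts ng a1 d rest := by
        simp only [btInner]
        rw [if_neg hc]
      obtain ⟨e2, hrun, hkne2, houte2⟩ := ih a1 d ha1
        (fun x hx => hsub x (List.mem_cons_of_mem _ hx)) hkn hcard
      exact ⟨e2, hstep.trans hrun, hkne2, houte2⟩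

lemma outerFail {f : Nat} {g H ng : Int} {acts : List String}
    (hgH : g ≤ H) (hHng : H ≤ ng)
    (hrec : ∀ d', KN d' → g + 1 ≤ H →
      (freeF acts d' (g + 1) H).card < 2 * ((H - (g + 1)).toNat + 1) →
      ∃ e, btA f (g + 1) d' acts ng = ((false, []), e) ∧ KN e ∧ Out (g + 1) H d' e) :
    ∀ (l : List String) (d : List (Int × List String)),
    (∀ x ∈ l, x ∈ acts) → KN d →
    (freeF acts d g H).card < 2 * ((H - g).toNat + 1) →
    ∃ e, btOuter f g d acts ng l = (none, e) ∧ KN e ∧ Out g H d e := by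
  intro l
  induction l with
  | nil =>
    intro d _ hkn _
    exact ⟨d, by simp [btOuter], hkn, rfl⟩
  | cons a1 rest ih =>
    intro d hsub hkn hcard
    obtain ⟨e1, hrun1, hkne1, houte1⟩ := innerFail hgH hHng hrec acts a1 d
      (hsub a1 (List.mem_cons_self ..)) (fun x hx => hx) hkn hcard
    have hstep : btOuter f g d acts ng (a1 :: rest) = btOuter f g e1 acts ng rest := by
      simp only [btOuter]
      rw [hrun1]
    have hcard1 : (freeF acts e1 g H).card < 2 * ((H - g).toNat + 1) := by
      rw [← freeF_Out houte1]; exact hcard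
    obtain ⟨e2, hrun2, hkne2, houte2⟩ := ih e1
      (fun x hx => hsub x (List.mem_cons_of_mem _ hx)) hkne1 hcard1
    exact ⟨e2, hstep.trans hrun2, hkne2, houte1.trans houte2⟩

lemma afail {ng : Int} {acts : List String} :
    ∀ (f : Nat) (g : Int) (d : List (Int × List String)) (H : Int), KN d →
    f = (ng + 1 - g).toNat → g ≤ H → H ≤ ng →
    (freeF acts d g H).card < 2 * ((H - g).toNat + 1) →
    ∃ e, btA f g d acts ng = ((false, []), e) ∧ KN e ∧ Out g H d e := by
  intro f
  induction f with
  | zero => intro g d H _ hf hgH hHng _; omega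
  | succ f ih =>
    intro g d H hkn hf hgH hHng hcard
    have hng : ¬ g > ng := by omega
    have hrec : ∀ d', KN d' → g + 1 ≤ H →
        (freeF acts d' (g + 1) H).card < 2 * ((H - (g + 1)).toNat + 1) →
        ∃ e, btA f (g + 1) d' acts ng = ((false, []), e) ∧ KN e ∧ Out (g + 1) H d' e := by
      intro d' hkn' hgH' hcard'
      exact ih (g + 1) d' H hkn' (by omega) hgH' hHng hcard'
    obtain ⟨e, hrun, hkne, houte⟩ := outerFail hgH hHng hrec acts d (fun x hx => hx) hkn hcard
    refine ⟨e, ?_, hkne, houte⟩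
    simp only [btA, if_neg hng]
    rw [hrun]

lemma main {acts : List String} {ng : Int} :
    ∀ (f : Nat) (g : Int) (d : List (Int × List String)), KN d →
    f = (ng + 1 - g).toNat →
    (btA f g d acts ng).1 = goB f g d acts := by
  intro f
  induction f with
  | zero =>
    intro g d _ hf
    have hgt : g > ng := by omega
    simp [btA.eq_def, hgt, goB]
  | succ f ih =>
    intro g d hkn hf
    have hng : ¬ g > ng := by omega
    simp only [goB]
    rcases hf1 : acts.find? (fun x => !(PySem.Set.contains (blockedB d g) x)) with _ | a1
    · -- no free value at all: every candidate pair is invalid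
      have hall : ∀ b1 ∈ acts, ∀ b2 ∈ acts, ((b1 != b2) && isValidA d g b1 b2) = false := by
        intro b1 h1 b2 h2
        have hx := List.find?_eq_none.mp hf1 b1 h1
        have hmem : b1 ∈ wblk d g g := contains_blockedB.mp (by simpa using hx)
        have hnv : isValidA d g b1 b2 ≠ true := fun hv => (isValidA_true_iff.mp hv).1 hmem
        simp [Bool.eq_false_iff.mpr hnv]
      simp only [btA.eq_def, if_neg hng]
      rw [outerSkip acts d hall]
    · rcases hf2 : acts.find? (fun x => !(PySem.Set.contains (blockedB d g) x) && x != a1)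
        with _ | a2
      · -- a1 is the only free value: still no valid pair
        have hfree_eq : ∀ x ∈ acts, x ∉ wblk d g g → x = a1 := by
          intro x hx hnb
          have h2 := List.find?_eq_none.mp hf2 x hx
          have hcf : PySem.Set.contains (blockedB d g) x = false := by
            cases hcb : PySem.Set.contains (blockedB d g) x
            · rfl
            · exact absurd (contains_blockedB.mp hcb) hnb
          rw [hcf] at h2
          simpa [bne_iff_ne] using h2
        have hall : ∀ b1 ∈ acts, ∀ b2 ∈ acts, ((b1 != b2) && isValidA d g b1 b2) = false := by
          intro b1 h1 b2 h2
          cases hc : ((b1 != b2) && isValidA d g b1 b2)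
          · rfl
          · exfalso
            obtain ⟨hne', hval⟩ := Bool.and_eq_true_iff.mp hc
            obtain ⟨hb1f, hb2f⟩ := isValidA_true_iff.mp hval
            have e1 := hfree_eq b1 h1 hb1f
            have e2 := hfree_eq b2 h2 hb2f
            exact (bne_iff_ne.mp hne') (e1.trans e2.symm)
        simp only [btA.eq_def, if_neg hng]
        rw [outerSkip acts d hall, hf2]
      · -- both found: A picks exactly this pair first
        obtain ⟨s1, t1, he1, hs1, ha1p⟩ := find?_split hf1
        obtain ⟨s2, t2, he2, hs2, ha2p⟩ := find?_split hf2
        have ha1m : a1 ∈ acts := by rw [he1]; simp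
        have ha2m : a2 ∈ acts := by rw [he2]; simp
        have ha1f : a1 ∉ wblk d g g := by
          intro hcw
          have hcb := contains_blockedB.mpr hcw
          rw [hcb] at ha1p
          simp at ha1p
        obtain ⟨hx2, hy2⟩ := Bool.and_eq_true_iff.mp ha2p
        have ha2f : a2 ∉ wblk d g g := by
          intro hcw
          have hcb := contains_blockedB.mpr hcw
          rw [hcb] at hx2
          simp at hx2
        have hne : a1 ≠ a2 := Ne.symm (bne_iff_ne.mp hy2)
        have hcond : ((a1 != a2) && isValidA d g a1 a2) = true := by
          rw [isValidA_true_iff.mpr ⟨ha1f, ha2f⟩, bne_iff_ne.mpr hne]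
          rfl
        have hpre1 : ∀ b1 ∈ s1, ∀ b2 ∈ acts, ((b1 != b2) && isValidA d g b1 b2) = false := by
          intro b1 h1 b2 _
          have hx := hs1 b1 h1
          have hmem : b1 ∈ wblk d g g := contains_blockedB.mp (by simpa using hx)
          have hnv : isValidA d g b1 b2 ≠ true := fun hv => (isValidA_true_iff.mp hv).1 hmem
          simp [Bool.eq_false_iff.mpr hnv]
        have hpre2 : ∀ b ∈ s2, ((a1 != b) && isValidA d g a1 b) = false := by
          intro b hb
          have hx := hs2 b hb
          cases hcb : PySem.Set.contains (blockedB d g) b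
          · rw [hcb] at hx
            simp only [Bool.not_false, Bool.true_and] at hx
            have : b = a1 := by simpa [bne_iff_ne] using hx
            subst this
            simp
          · have hmem : b ∈ wblk d g g := contains_blockedB.mp hcb
            have hnv : isValidA d g a1 b ≠ true := fun hv => (isValidA_true_iff.mp hv).2 hmem
            simp [Bool.eq_false_iff.mpr hnv]
        have hstep1 : btOuter f g d acts ng acts = btOuter f g d acts ng (a1 :: t1) := by
          have hq := outerSkipPrefix (f := f) (g := g) (ng := ng) (acts := acts)
            s1 (a1 :: t1) d hpre1
          rw [← he1] at hq
          exact hq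
        have hstep2 : btInner f g acts ng a1 d acts = btInner f g acts ng a1 d (a2 :: t2) := by
          have hq := innerSkipPrefix (f := f) (g := g) (ng := ng) (acts := acts)
            s2 (a2 :: t2) a1 d hpre2
          rw [← he2] at hq
          exact hq
        have hknst : KN (dinsert d g [a1, a2]) := KN_dinsert hkn
        have hIH : (btA f (g + 1) (dinsert d g [a1, a2]) acts ng).1
            = goB f (g + 1) (dinsert d g [a1, a2]) acts := ih (g + 1) _ hknst (by omega)
        simp only [btA.eq_def, if_neg hng]
        rw [hf2]
        cases hRb : (goB f (g + 1) (dinsert d g [a1, a2]) acts).1 with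
        | true =>
          have hsucc : (btA f (g + 1) (dinsert d g [a1, a2]) acts ng).1.1 = true := by
            rw [hIH]; exact hRb
          have hres := btARes hsucc
          have hbi : btInner f g acts ng a1 d acts
              = (some (true, (btA f (g + 1) (dinsert d g [a1, a2]) acts ng).2),
                 (btA f (g + 1) (dinsert d g [a1, a2]) acts ng).2) := by
            rw [hstep2]
            simp only [btInner]
            rw [if_pos hcond, if_pos hsucc]
          have houter : btOuter f g d acts ng acts
              = (some (true, (btA f (g + 1) (dinsert d g [a1, a2]) acts ng).2),
                 (btA f (g + 1) (dinsert d g [a1, a2]) acts ng).2) := by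
            rw [hstep1]
            simp only [btOuter]
            rw [hbi]
          rw [houter]
          exact hres.symm.trans hIH
        | false =>
          have hfail : (btA f (g + 1) (dinsert d g [a1, a2]) acts ng).1.1 = false := by
            rw [hIH]; exact hRb
          obtain ⟨i, hi, hcardw⟩ := goB_false_witness (acts := acts) hknst hRb
          have hng2 : ng - g = (f : Int) := by omega
          have hgH : g ≤ g + 1 + (i : Int) := by omega
          have hgH1 : g + 1 ≤ g + 1 + (i : Int) := by omega
          have hHng : g + 1 + (i : Int) ≤ ng := by omega
          have ha1H : a1 ∉ wblk d g (g + 1 + (i : Int)) := fun hx => ha1f (wblk_anti hgH hx)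
          have ha2H : a2 ∉ wblk d g (g + 1 + (i : Int)) := fun hx => ha2f (wblk_anti hgH hx)
          have hcardd := card_dinsert_pair (acts := acts) hkn hgH hne ha1m ha2m ha1H ha2H
          have hcardw' : (freeF acts (dinsert d g [a1, a2]) (g + 1) (g + 1 + (i : Int))).card
              < 2 * (((g + 1 + (i : Int)) - (g + 1)).toNat + 1) := by
            rw [show g + 1 + (i : Int) = (g + 1) + (i : Int) by ring]
            rw [show ((g + 1) + (i : Int) - (g + 1)).toNat = i by omega]
            exact hcardw
          have hrecfn : ∀ d', KN d' → g + 1 ≤ g + 1 + (i : Int) →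
              (freeF acts d' (g + 1) (g + 1 + (i : Int))).card
                < 2 * (((g + 1 + (i : Int)) - (g + 1)).toNat + 1) →
              ∃ e, btA f (g + 1) d' acts ng = ((false, []), e) ∧ KN e
                ∧ Out (g + 1) (g + 1 + (i : Int)) d' e := by
            intro d' kn hle hc
            exact afail f (g + 1) d' (g + 1 + (i : Int)) kn (by omega) hle hHng hc
          obtain ⟨e, hbtfail, hkne, houte⟩ :=
            hrecfn (dinsert d g [a1, a2]) hknst hgH1 hcardw'
          have hout1 : Out g (g + 1 + (i : Int)) d (dinsert d g [a1, a2]) :=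
            Out_dinsert (le_refl g) hgH
          have hout2 : Out g (g + 1 + (i : Int)) (dinsert d g [a1, a2]) e := Out_mono houte
          have hout3 : Out g (g + 1 + (i : Int)) e (dinsert e g []) :=
            Out_dinsert (le_refl g) hgH
          have houtd2 : Out g (g + 1 + (i : Int)) d (dinsert e g []) :=
            (hout1.trans hout2).trans hout3
          have hcardD : (freeF acts d g (g + 1 + (i : Int))).card
              < 2 * (((g + 1 + (i : Int)) - g).toNat + 1) := by
            rw [show ((g + 1 + (i : Int)) - g).toNat = i + 1 by omega]
            rw [show g + 1 + (i : Int) = (g + 1) + (i : Int) by ring] at hcardd ⊢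
            omega
          have hcardD2 : (freeF acts (dinsert e g []) g (g + 1 + (i : Int))).card
              < 2 * (((g + 1 + (i : Int)) - g).toNat + 1) := by
            rw [← freeF_Out houtd2]
            exact hcardD
          have ht2sub : ∀ x ∈ t2, x ∈ acts := by
            intro x hx
            rw [he2]
            simp [hx]
          have ht1sub : ∀ x ∈ t1, x ∈ acts := by
            intro x hx
            rw [he1]
            simp [hx]
          obtain ⟨e2, hrun2, hkne2, houte2⟩ := innerFail hgH hHng hrecfn t2 a1
            (dinsert e g []) ha1m ht2sub (KN_dinsert hkne) hcardD2
          have hbi : btInner f g acts ng a1 d acts = (none, e2) := by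
            rw [hstep2]
            simp only [btInner]
            rw [if_pos hcond, hbtfail]
            simpa using hrun2
          have hcardE2 : (freeF acts e2 g (g + 1 + (i : Int))).card
              < 2 * (((g + 1 + (i : Int)) - g).toNat + 1) := by
            rw [← freeF_Out (houtd2.trans houte2)]
            exact hcardD
          obtain ⟨e3, hrun3, _, _⟩ := outerFail hgH hHng hrecfn t1 e2 ht1sub hkne2 hcardE2
          have houter : btOuter f g d acts ng acts = (none, e3) := by
            rw [hstep1]
            simp only [btOuter]
            rw [hbi]
            exact hrun3
          rw [houter]
          show (false, ([] : List (Int × List String))) = goB f (g + 1) (dinsert d g [a1, a2]) acts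
          exact (goB_false hRb).symm

-- ===== VERDICT (by name: the statement is the Claim_ definition above) =====
theorem backtrack_spec : Claim_equal_backtrack := by
  intro group_id assignment activities num_groups _ hpre
  unfold Spec_backtrack backtrack backtrack_alt
  exact main ((num_groups + 1 - group_id).toNat) group_id assignment hpre rfl
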